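-- pv_equiv track=rewrite | github.com/pypi-data/pypi-mirror-210 | packages/slimpy/slimpy-0.1.0.tar.gz/slimpy-0.1.0/src/slimpy/core.py | fragmentation
-- ===== SOURCE A (Python) =====
-- from typing import Optional, Iterator
--
-- def fragmentation(string: str, delimiter_count: int,
--                   string_length: Optional[int] = None) -> dict:
--     """Return a dictionary of List of fragments of string.
--     The returned dictionary "key: value" format is
--     {
--         int:
--             [
--                 [str, ...],
--                 [str, ...],
--                 ...
--             ], ...
--     }
--     to be more precise:
--     {
--         string_length - how many delimiter used:
--             [
--                 [fragment, ...],
--                 [fragment, ...],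
--                 ...
--             ],
--         ...
--     }
--     """
--     string_length = len(string) if string_length is None else string_length
--     frag_dict = {}
--     for i in range(1, delimiter_count + 1):
--         frag_dict[string_length - i] = slicer(string, i + 1, i + 1,
--                                               string_length - (i - 1))
--     return frag_dict
--
-- def slicer(word, ori_factor, indicator_factor, length, start=0,
--            new_list=None, template_list=None):
--     """ Slicer engine for fragmentation """
--     if new_list is None:
--         new_list, template_list = [], []
--
--     if indicator_factor == 1:
--         word_fragment = word[start:length]
--         new_end_list = new_list.copy()
--         new_end_list.append(word_fragment)
--         template_list.append(new_end_list)
--     else: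
--         for i in range(start, length):
--             word_fragment = word[start:i]
--             new_end_list = new_list.copy()
--             new_end_list.append(word_fragment)
--             slicer(word, ori_factor, indicator_factor - 1, length + 1, i + 1,
--                    new_end_list, template_list)
--
--     if ori_factor == indicator_factor:
--         return template_list
-- ===== SOURCE B (Python) =====
-- def _combinations(n, r, start=0):
--     """Yield all ascending r-element cut lists from range(start, n), lexicographic."""
--     if r == 0:
--         yield []
--         return
--     for i in range(start, n - r + 1):
--         for tail in _combinations(n, r - 1, i + 1):
--             yield [i] + tail
--
--
-- def _frags(word, cuts, string_length):
--     """Fragments of word for the given ascending cut positions."""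
--     parts = [word[0:cuts[0]]]
--     for j in range(1, len(cuts)):
--         parts.append(word[cuts[j - 1] + 1:cuts[j]])
--     parts.append(word[cuts[-1] + 1:string_length + 1])
--     return parts
--
--
-- def fragmentation(string, delimiter_count, string_length=None):
--     string_length = len(string) if string_length is None else string_length
--     frag_dict = {}
--     for i in range(1, delimiter_count + 1):
--         frag_dict[string_length - i] = [
--             _frags(string, c, string_length)
--             for c in _combinations(string_length, i)
--         ]
--     return frag_dict
-- ===== Notes on version B (the rewrite author's own statement) =====
-- stated objective: alternative
-- what changed: Replaces the accumulator-threading recursive slicer (which interleaves slicing with the search and copies the growing fragment list at every recursion level) by direct combinatorial enumeration: a generator yields the ascending cut-index tuples and the string is sliced once per tuple in an independent pass.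
import Mathlib
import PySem

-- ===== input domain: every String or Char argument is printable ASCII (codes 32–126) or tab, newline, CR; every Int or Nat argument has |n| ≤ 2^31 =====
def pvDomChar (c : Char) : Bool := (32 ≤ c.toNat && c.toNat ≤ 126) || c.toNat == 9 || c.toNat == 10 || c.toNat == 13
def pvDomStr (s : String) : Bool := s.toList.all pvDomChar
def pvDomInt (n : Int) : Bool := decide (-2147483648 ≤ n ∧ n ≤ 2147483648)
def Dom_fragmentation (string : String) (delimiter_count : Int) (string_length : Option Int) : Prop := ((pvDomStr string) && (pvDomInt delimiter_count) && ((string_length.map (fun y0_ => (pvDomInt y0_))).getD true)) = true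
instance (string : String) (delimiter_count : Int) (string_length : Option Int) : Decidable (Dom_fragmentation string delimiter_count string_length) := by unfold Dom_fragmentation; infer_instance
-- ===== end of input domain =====

-- B replaces A's accumulator-threading recursive slicer by separate combinatorial enumeration
-- of the cut-index tuples plus an independent slicing pass per tuple (objective: alternative).

-- ===== PORT A =====
-- slicer's in-place appends to template_list are modelled by threading the list through the
-- recursion; indicator_factor is a Nat (fragmentation only calls slicer with
-- ori_factor == indicator_factor = i+1 ≥ 2, so the returned template_list is always the result;
-- the 0 case, where the Python would recurse without end, is unreachable from fragmentation).
def slicerAux (word : String) : Nat → Int → Int → List String → List (List String) → List (List String)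
  | 0, _, _, _, template => template
  | 1, length, start, newList, template =>
      template ++ [newList ++ [PySem.Str.slice word (some start) (some length)]]
  | k + 2, length, start, newList, template =>
      (PySem.List.pyRange start length 1).foldl
        (fun tmpl i =>
          slicerAux word (k + 1) (length + 1) (i + 1)
            (newList ++ [PySem.Str.slice word (some start) (some i)]) tmpl)
        template

def fragmentation (string : String) (delimiter_count : Int) (string_length : Option Int) : List (Int × List (List String)) :=
  let L : Int := match string_length with
    | none => PySem.Str.len string
    | some n => n
  ((PySem.List.pyRange 1 (delimiter_count + 1) 1).foldl
      (fun d i =>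
        PySem.Dict.insert d (L - i) (slicerAux string (i + 1).toNat (L - (i - 1)) 0 [] []))
      PySem.Dict.empty).items

-- ===== PORT B =====
-- Source B's generator _combinations(n, r, start), with the yielded lists collected in order
def combIdx (n : Int) : Nat → Int → List (List Int)
  | 0, _ => [[]]
  | r + 1, start =>
      (PySem.List.pyRange start (n - (r + 1) + 1) 1).flatMap
        (fun i => (combIdx n r (i + 1)).map (i :: ·))

-- Source B's _frags: first slice, then the loop over consecutive cut pairs, then the final slice
def fragsGo (word : String) (L : Int) : Int → List Int → List String
  | prev, [] => [PySem.Str.slice word (some (prev + 1)) (some (L + 1))]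
  | prev, c :: cs => PySem.Str.slice word (some (prev + 1)) (some c) :: fragsGo word L c cs

def frags (word : String) (cuts : List Int) (L : Int) : List String :=
  match cuts with
  | [] => []   -- _frags is only called with a nonempty cut list (combIdx with r ≥ 1)
  | c :: cs => PySem.Str.slice word (some 0) (some c) :: fragsGo word L c cs

def fragmentation_alt (string : String) (delimiter_count : Int) (string_length : Option Int) : List (Int × List (List String)) :=
  let L : Int := match string_length with
    | none => PySem.Str.len string
    | some n => n
  ((PySem.List.pyRange 1 (delimiter_count + 1) 1).foldl
      (fun d i =>
        PySem.Dict.insert d (L - i)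
          ((combIdx L i.toNat 0).map (fun c => frags string c L)))
      PySem.Dict.empty).items

-- ===== PRECONDITION & SPEC =====
def Spec_fragmentation (string : String) (delimiter_count : Int) (string_length : Option Int) (out : List (Int × List (List String))) : Prop := out = fragmentation_alt string delimiter_count string_length
instance (string : String) (delimiter_count : Int) (string_length : Option Int) (out : List (Int × List (List String))) : Decidable (Spec_fragmentation string delimiter_count string_length out) := by unfold Spec_fragmentation; infer_instance

-- ===== CLAIM (what is proved, stated in full; the proofs are below) =====
def Claim_equal_fragmentation : Prop := ∀ (string : String) (delimiter_count : Int) (string_length : Option Int), Dom_fragmentation string delimiter_count string_length → Spec_fragmentation string delimiter_count string_length (fragmentation string delimiter_count string_length)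

-- ===== LEMMAS AND PROOFS =====

-- The slices A emits from position start for the remaining cut list; the final segment's
-- bound B stays fixed through the recursion.
def tailFrags (word : String) (B : Int) : Int → List Int → List String
  | start, [] => [PySem.Str.slice word (some start) (some B)]
  | start, c :: cs => PySem.Str.slice word (some start) (some c) :: tailFrags word B (c + 1) cs

-- A's slicer with k+1 segments (k cuts), current bound `length` and start `start`, appends to
-- template one completed list per ascending cut tuple, in the same (lexicographic) order as
-- B's combIdx with n = length + k - 1 (each recursion level raises `length` by one, which is
-- exactly combIdx's bound i < n - r + 1 for r cuts remaining).
lemma slicer_eq (word : String) : ∀ (k : Nat) (length start : Int) (newList : List String) (t : List (List String)),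
    slicerAux word (k + 1) length start newList t
      = t ++ (combIdx (length + k - 1) k start).map
          (fun c => newList ++ tailFrags word (length + k) start c) := by
  intro k
  induction k with
  | zero =>
      intro length start newList t
      simp [slicerAux, tailFrags, combIdx]
  | succ k ih =>
      intro length start newList t
      show (PySem.List.pyRange start length 1).foldl
          (fun tmpl i =>
            slicerAux word (k + 1) (length + 1) (i + 1)
              (newList ++ [PySem.Str.slice word (some start) (some i)]) tmpl) t = _
      have hstep : ∀ (tmpl : List (List String)), ∀ i ∈ PySem.List.pyRange start length 1,
          slicerAux word (k + 1) (length + 1) (i + 1)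
              (newList ++ [PySem.Str.slice word (some start) (some i)]) tmpl
            = tmpl ++ (combIdx (length + k) k (i + 1)).map
                (fun c => newList ++ tailFrags word (length + (k + 1)) start (i :: c)) := by
        intro tmpl i _
        rw [ih (length + 1) (i + 1)]
        have hb : length + 1 + (k : Int) - 1 = length + k := by ring
        have hB : length + 1 + (k : Int) = length + ((k : Int) + 1) := by ring
        rw [hb, hB]
        congr 1
        apply List.map_congr_left
        intro c _
        simp [tailFrags, List.append_assoc]
      rw [PySem.List.foldl_congr_mem _ _
            (fun tmpl i => tmpl ++ (combIdx (length + k) k (i + 1)).map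
                (fun c => newList ++ tailFrags word (length + (k + 1)) start (i :: c))) t hstep,
          PySem.List.foldl_append_eq_flatMap]
      congr 1
      show (PySem.List.pyRange start length 1).flatMap _
          = (combIdx (length + ((k : Nat) + 1 : Nat) - 1) (k + 1) start).map _
      have hn : length + ((k : Nat) + 1 : Nat) - 1 = length + (k : Int) := by push_cast; ring
      rw [hn]
      show _ = ((PySem.List.pyRange start (length + (k : Int) - ((k : Int) + 1) + 1) 1).flatMap
          (fun i => (combIdx (length + k) k (i + 1)).map (i :: ·))).map _
      have hr : length + (k : Int) - ((k : Int) + 1) + 1 = length := by ring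
      rw [hr, List.map_flatMap]
      apply List.flatMap_congr
      intro i _
      rw [List.map_map]
      rfl

-- the tail of B's _frags equals A's tail slices (final bound L+1 = (L - k) + (k + 1))
lemma tailFrags_eq_fragsGo (word : String) (L : Int) : ∀ (cs : List Int) (prev : Int),
    tailFrags word (L + 1) (prev + 1) cs = fragsGo word L prev cs := by
  intro cs
  induction cs with
  | nil => intro prev; simp [tailFrags, fragsGo]
  | cons c cs ih => intro prev; simp [tailFrags, fragsGo, ih c]

-- every cut list produced by combIdx with r ≥ 1 cuts is nonempty
lemma combIdx_ne_nil (n : Int) (r : Nat) (start : Int) :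
    ∀ c ∈ combIdx n (r + 1) start, c ≠ [] := by
  intro c hc
  simp only [combIdx, List.mem_flatMap, List.mem_map] at hc
  obtain ⟨i, _, c', _, hc'⟩ := hc
  rw [← hc']
  exact List.cons_ne_nil i c'

-- per-key equality: A's slicer call for i ≥ 1 delimiters produces B's combination map
lemma key_value_eq (word : String) (L i : Int) (hi : 1 ≤ i) :
    slicerAux word (i + 1).toNat (L - (i - 1)) 0 [] []
      = (combIdx L i.toNat 0).map (fun c => frags word c L) := by
  obtain ⟨k, hk⟩ : ∃ k : Nat, i = (k : Int) + 1 := ⟨(i - 1).toNat, by omega⟩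
  subst hk
  have h1 : ((k : Int) + 1 + 1).toNat = (k + 1) + 1 := by omega
  have h2 : ((k : Int) + 1).toNat = k + 1 := by omega
  rw [h1, h2, slicer_eq]
  have h3 : L - ((k : Int) + 1 - 1) + ((k + 1 : Nat) : Int) - 1 = L := by push_cast; ring
  have h4 : L - ((k : Int) + 1 - 1) + ((k + 1 : Nat) : Int) = L + 1 := by push_cast; ring
  rw [h3, h4, List.nil_append]
  apply List.map_congr_left
  intro c hc
  match c, combIdx_ne_nil L k 0 c hc with
  | c0 :: cs, _ =>
    show PySem.Str.slice word (some 0) (some c0) :: tailFrags word (L + 1) (c0 + 1) cs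
        = frags word (c0 :: cs) L
    rw [tailFrags_eq_fragsGo]
    rfl

-- ===== VERDICT (by name: the statement is the Claim_ definition above) =====
theorem fragmentation_spec : Claim_equal_fragmentation := by
  intro string delimiter_count string_length _
  show fragmentation string delimiter_count string_length
      = fragmentation_alt string delimiter_count string_length
  unfold fragmentation fragmentation_alt
  apply congrArg PySem.Dict.items
  apply PySem.List.foldl_congr_mem
  intro d i hi
  have h1 : (1 : Int) ≤ i := (PySem.List.mem_pyRange_one.mp hi).1
  rw [key_value_eq string _ i h1]
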